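-- pv_equiv track=rewrite | github.com/amhe1346/RTES_Rover | analyze_mt_trace_integrity.py | continuity_metrics
-- ===== SOURCE A (Python) =====
-- def continuity_metrics(cycles):
--     if len(cycles) < 2:
--         return 0, 0, 0
--
--     sorted_cycles = sorted(cycles)
--     gaps = 0
--     max_gap = 0
--     backward = 0
--
--     prev = sorted_cycles[0]
--     for cur in sorted_cycles[1:]:
--         if cur <= prev:
--             backward += 1
--         delta = cur - prev
--         if delta > 1:
--             gaps += 1
--             if delta > max_gap:
--                 max_gap = delta
--         prev = cur
--
--     return gaps, max_gap, backward
-- ===== SOURCE B (Python) =====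
-- def continuity_metrics(cycles):
--     if len(cycles) < 2:
--         return 0, 0, 0
--     s = set(cycles)
--     starts = sorted(x for x in s if x - 1 not in s)
--     ends = sorted(x for x in s if x + 1 not in s)
--     max_gap = max((b - a for a, b in zip(ends, starts[1:])), default=0)
--     return len(starts) - 1, max_gap, len(cycles) - len(s)
-- ===== Notes on version B (the rewrite author's own statement) =====
-- stated objective: alternative
-- what changed: B never scans adjacent differences of a sorted copy: it decomposes the values into maximal runs of consecutive integers via set membership (run starts = x with x-1 not in set, run ends = x with x+1 not in set), gets gaps as number-of-runs minus 1, max_gap by pairing each run end with the next run start, and duplicates as len(cycles)-len(set); only the (deduplicated) run boundaries are sorted, not the full list.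
import Mathlib
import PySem

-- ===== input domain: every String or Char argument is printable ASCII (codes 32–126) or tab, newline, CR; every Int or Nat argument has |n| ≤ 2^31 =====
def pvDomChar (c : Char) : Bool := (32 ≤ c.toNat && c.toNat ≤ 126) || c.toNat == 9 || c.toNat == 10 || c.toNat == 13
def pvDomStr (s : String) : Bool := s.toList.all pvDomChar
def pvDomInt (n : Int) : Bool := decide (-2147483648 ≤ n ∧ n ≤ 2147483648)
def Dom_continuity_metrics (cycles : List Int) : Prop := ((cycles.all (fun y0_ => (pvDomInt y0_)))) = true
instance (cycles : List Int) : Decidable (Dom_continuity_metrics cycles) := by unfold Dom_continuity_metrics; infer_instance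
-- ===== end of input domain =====

-- B replaces A's adjacent-difference scan of the sorted list by a run decomposition of the value set:
-- run starts/ends found by set membership, gaps = runs-1, max_gap from pairing run ends with next run starts (objective: alternative).

-- ===== PORT A =====
-- loop body of A's 'for cur in sorted_cycles[1:]' (state: gaps, max_gap, backward, prev)
def aStep (st : Int × Int × Int × Int) (cur : Int) : Int × Int × Int × Int :=
  let backward := if cur ≤ st.2.2.2 then st.2.2.1 + 1 else st.2.2.1
  let delta := cur - st.2.2.2
  let gm := if delta > 1 then (st.1 + 1, if delta > st.2.1 then delta else st.2.1) else (st.1, st.2.1)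
  (gm.1, gm.2, backward, cur)

def continuity_metrics (cycles : List Int) : Int × Int × Int :=
  if cycles.length < 2 then (0, 0, 0)
  else
    match PySem.List.sorted cycles (fun x => x) false with
    | [] => (0, 0, 0)  -- unreachable: the sorted list has length ≥ 2 here
    | p :: rest =>
      let st := rest.foldl aStep (0, 0, 0, p)
      (st.1, st.2.1, st.2.2.1)

-- ===== PORT B =====
def continuity_metrics_alt (cycles : List Int) : Int × Int × Int :=
  if cycles.length < 2 then (0, 0, 0)
  else
    let s := PySem.Set.ofList cycles
    let starts := PySem.List.sorted (s.filter (fun x => !(PySem.Set.contains s (x - 1)))) (fun x => x) false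
    let ends := PySem.List.sorted (s.filter (fun x => !(PySem.Set.contains s (x + 1)))) (fun x => x) false
    let max_gap := PySem.List.maxD
      ((ends.zip (PySem.List.slice starts (some 1) none)).map (fun p => p.2 - p.1)) (fun x => x) 0
    ((starts.length : Int) - 1, max_gap, (cycles.length : Int) - (PySem.Set.len s : Int))

-- ===== PRECONDITION & SPEC =====
def Spec_continuity_metrics (cycles : List Int) (out : Int × Int × Int) : Prop := out = continuity_metrics_alt cycles
instance (cycles : List Int) (out : Int × Int × Int) : Decidable (Spec_continuity_metrics cycles out) := by unfold Spec_continuity_metrics; infer_instance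

-- ===== CLAIM (what is proved, stated in full; the proofs are below) =====
def Claim_equal_continuity_metrics : Prop := ∀ (cycles : List Int), Dom_continuity_metrics cycles → Spec_continuity_metrics cycles (continuity_metrics cycles)

-- ===== LEMMAS AND PROOFS =====

/-- proof-side: gaps/max_gap accumulation over one adjacent pair. -/
def bStep (gm : Int × Int) (ab : Int × Int) : Int × Int :=
  let d := ab.2 - ab.1
  if d > 1 then (gm.1 + 1, max gm.2 d) else gm

/-- proof-side: running max of (next run start − run end). -/
def mStep (m : Int) (p : Int × Int) : Int := max m (p.2 - p.1)

/-- Remove adjacent duplicates (proof-side helper). -/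
def dAdj : List Int → List Int
  | [] => []
  | [a] => [a]
  | a :: b :: t => if a = b then dAdj (b :: t) else a :: dAdj (b :: t)

lemma mem_dAdj (x : Int) : ∀ (l : List Int), x ∈ dAdj l ↔ x ∈ l
  | [] => by simp [dAdj]
  | [a] => by simp [dAdj]
  | a :: b :: t => by
    by_cases h : a = b <;>
      simp [dAdj, h, mem_dAdj x (b :: t)]
  termination_by l => l.length

lemma dAdj_cons_head : ∀ (t : List Int) (a : Int), ∃ r, dAdj (a :: t) = a :: r
  | [], a => ⟨[], rfl⟩
  | b :: t, a => by
    by_cases h : a = b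
    · obtain ⟨r, hr⟩ := dAdj_cons_head t b
      exact ⟨r, by simp [dAdj, h, hr]⟩
    · exact ⟨dAdj (b :: t), by simp [dAdj, h]⟩

lemma chain_lt_dAdj : ∀ (l : List Int), List.IsChain (· ≤ ·) l → List.IsChain (· < ·) (dAdj l)
  | [], _ => by simp [dAdj]
  | [a], _ => by simp [dAdj, List.IsChain.singleton]
  | a :: b :: t, h => by
    rw [List.isChain_cons_cons] at h
    by_cases hab : a = b
    · simpa [dAdj, hab] using chain_lt_dAdj (b :: t) h.2
    · obtain ⟨r, hr⟩ := dAdj_cons_head t b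
      have := chain_lt_dAdj (b :: t) h.2
      rw [hr] at this
      simp only [dAdj, hab, if_false]
      rw [hr]
      exact List.isChain_cons_cons.2 ⟨lt_of_le_of_ne h.1 hab, this⟩
  termination_by l => l.length

lemma pairwise_lt_dAdj (l : List Int) (h : l.Pairwise (· ≤ ·)) : (dAdj l).Pairwise (· < ·) :=
  List.isChain_iff_pairwise.1 (chain_lt_dAdj l (List.isChain_iff_pairwise.2 h))

lemma getLastD_indep (x : Int) (l : List Int) (d d' : Int) :
    (x :: l).getLast?.getD d = (x :: l).getLast?.getD d' := by
  cases h : (x :: l).getLast? with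
  | none => simp [List.getLast?_eq_none_iff] at h
  | some y => rfl

-- main loop invariant for A: A's fold over a ≤-sorted tail equals the bStep fold over adjacent
-- pairs of the deduplicated list, with backward = length difference
lemma loop_eq : ∀ (rest : List Int) (p g m b : Int),
    List.IsChain (· ≤ ·) (p :: rest) →
    rest.foldl aStep (g, m, b, p) =
      ( ((((dAdj (p :: rest)).zip (dAdj (p :: rest)).tail).foldl bStep (g, m))).1,
        ((((dAdj (p :: rest)).zip (dAdj (p :: rest)).tail).foldl bStep (g, m))).2,
        b + (((p :: rest).length : Int) - ((dAdj (p :: rest)).length : Int)),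
        rest.getLastD p )
  | [], p, g, m, b, _ => by simp [dAdj]
  | c :: t, p, g, m, b, h => by
    rw [List.isChain_cons_cons] at h
    have hstep : (c :: t).foldl aStep (g, m, b, p) = t.foldl aStep (aStep (g, m, b, p) c) := rfl
    by_cases hpc : p = c
    · subst hpc
      have ha : aStep (g, m, b, p) p = (g, m, b + 1, p) := by
        simp [aStep]
      rw [hstep, ha, loop_eq t p g m (b + 1) h.2]
      simp only [dAdj, Prod.mk.injEq]
      refine ⟨rfl, rfl, ?_, ?_⟩
      · push_cast [List.length_cons]
        ring
      · cases t with
        | nil => simp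
        | cons x xs => simp only [List.getLastD_eq_getLast?]; exact getLastD_indep x xs _ _
    · have hlt : p < c := lt_of_le_of_ne h.1 hpc
      have ha : aStep (g, m, b, p) c = ((bStep (g, m) (p, c)).1, (bStep (g, m) (p, c)).2, b, c) := by
        simp only [aStep, bStep]
        have : ¬ c ≤ p := not_le.2 hlt
        by_cases hd : c - p > 1
        · have hmax : (if c - p > m then c - p else m) = max m (c - p) := by
            rcases lt_or_ge m (c - p) with h1 | h1
            · simp [h1, max_eq_right h1.le]
            · simp [not_lt.2 h1, max_eq_left h1]
          simp [this, hd, hmax]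
        · simp [this, hd]
      obtain ⟨r, hr⟩ := dAdj_cons_head t c
      have hda : dAdj (p :: c :: t) = p :: c :: r := by
        simp [dAdj, hpc, hr]
      rw [hstep, ha, loop_eq t c (bStep (g, m) (p, c)).1 (bStep (g, m) (p, c)).2 b h.2, hda, hr]
      have hzip : ((p :: c :: r).zip (c :: r)) = (p, c) :: ((c :: r).zip r) := rfl
      simp only [Prod.mk.injEq]
      refine ⟨?_, ?_, ?_, ?_⟩
      · simp [hzip, List.foldl_cons]
      · simp [hzip, List.foldl_cons]
      · rw [hr] at *
        push_cast [List.length_cons]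
        ring
      · cases t with
        | nil => simp
        | cons x xs => simp only [List.getLastD_eq_getLast?]; exact getLastD_indep x xs _ _
  termination_by rest => rest.length

/-- run starts of a list: elements whose predecessor is absent. -/
def rStarts (d : List Int) : List Int := d.filter (fun x => decide ((x - 1) ∉ d))
/-- run ends of a list: elements whose successor is absent. -/
def rEnds (d : List Int) : List Int := d.filter (fun x => decide ((x + 1) ∉ d))

-- elements after the head of a strictly increasing list exceed the head
lemma chain_head_lt (a : Int) (l : List Int) (h : List.IsChain (· < ·) (a :: l)) :
    ∀ x ∈ l, a < x :=
  (List.pairwise_cons.1 (List.isChain_iff_pairwise.1 h)).1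

-- the head of a strictly increasing list is always a run start
lemma rStarts_cons (a : Int) (l : List Int) (h : List.IsChain (· < ·) (a :: l)) :
    rStarts (a :: l) = a :: l.filter (fun x => decide ((x - 1) ∉ (a :: l))) := by
  unfold rStarts
  rw [List.filter_cons]
  have hm : (a - 1) ∉ (a :: l) := by
    intro hmem
    rcases List.mem_cons.1 hmem with h1 | h1
    · omega
    · exact absurd (chain_head_lt a l h _ h1) (by omega)
  rw [if_pos (by simp [hm])]

-- run-decomposition invariant: on a strictly increasing nonempty list, the adjacent-pair fold
-- equals (runs-1, max over run-boundary pairs), and every boundary difference exceeds 1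
lemma runs_eq : ∀ (d : List Int), List.IsChain (· < ·) d → ∀ (g m : Int),
    d ≠ [] →
    (d.zip d.tail).foldl bStep (g, m) =
      (g + ((rStarts d).length : Int) - 1,
       ((rEnds d).zip ((rStarts d).tail)).foldl mStep m) ∧
    (∀ p ∈ (rEnds d).zip ((rStarts d).tail), 1 < p.2 - p.1)
  | [], _, g, m, hne => absurd rfl hne
  | [a], h, g, m, _ => by
    have h1 : a - 1 ≠ a := by omega
    have h2 : a + 1 ≠ a := by omega
    refine ⟨?_, ?_⟩
    · simp [rStarts, rEnds, h1, h2]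
    · simp [rStarts, rEnds, h1, h2]
  | a :: b :: t, h, g, m, _ => by
    have hcc := List.isChain_cons_cons.1 h
    have hab : a < b := hcc.1
    have hTc : List.IsChain (· < ·) (b :: t) := hcc.2
    have hTgt : ∀ x ∈ b :: t, a < x := chain_head_lt a (b :: t) h
    have htgt : ∀ x ∈ t, b < x := chain_head_lt b t hTc
    have hSD := rStarts_cons a (b :: t) h
    have hST := rStarts_cons b t hTc
    have hzipD : ((a :: b :: t).zip (a :: b :: t).tail) = (a, b) :: ((b :: t).zip t) := rfl
    by_cases hb : b = a + 1
    · -- b continues a's run: the pair (a,b) changes nothing on either side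
      obtain ⟨IH1, IH2⟩ := runs_eq (b :: t) hTc g m (by simp)
      simp only [List.tail_cons] at IH1
      have hSD' : rStarts (a :: b :: t) = a :: t.filter (fun x => decide ((x - 1) ∉ (b :: t))) := by
        rw [hSD, List.filter_cons]
        have hbm : (b - 1) ∈ (a :: b :: t) := by
          have : b - 1 = a := by omega
          simp [this]
        rw [if_neg (by simp [hbm])]
        congr 1
        apply List.filter_congr
        intro x hx
        have hxb : b < x := htgt x hx
        have hiff : (x - 1) ∈ (a :: b :: t) ↔ (x - 1) ∈ (b :: t) := by
          constructor
          · intro hm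
            rcases List.mem_cons.1 hm with h1 | h1
            · omega
            · exact h1
          · intro hm
            exact List.mem_cons_of_mem _ hm
        simp only [hiff]
      have hED : rEnds (a :: b :: t) = rEnds (b :: t) := by
        unfold rEnds
        rw [List.filter_cons]
        have ham : (a + 1) ∈ (a :: b :: t) := by
          have : a + 1 = b := by omega
          simp [this]
        rw [if_neg (by simp [ham])]
        apply List.filter_congr
        intro x hx
        have hxa : a < x := hTgt x hx
        have hiff : (x + 1) ∈ (a :: b :: t) ↔ (x + 1) ∈ (b :: t) := by
          constructor
          · intro hm
            rcases List.mem_cons.1 hm with h1 | h1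
            · omega
            · exact h1
          · intro hm
            exact List.mem_cons_of_mem _ hm
        simp only [hiff]
      have hbs : bStep (g, m) (a, b) = (g, m) := by
        have : ¬ (b - a > 1) := by omega
        simp [bStep, this]
      have hlen : (rStarts (a :: b :: t)).length = (rStarts (b :: t)).length := by
        rw [hSD', hST]
        simp
      have htail : (rStarts (a :: b :: t)).tail = (rStarts (b :: t)).tail := by
        rw [hSD', hST]
        simp
      refine ⟨?_, ?_⟩
      · rw [hzipD, List.foldl_cons, hbs, hlen, htail, hED]
        exact IH1
      · rw [hED, htail]
        exact IH2
    · -- b starts a new run: (a,b) is a gap pair on both sides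
      have hb2 : a + 1 < b := by omega
      obtain ⟨IH1, IH2⟩ := runs_eq (b :: t) hTc (g + 1) (max m (b - a)) (by simp)
      simp only [List.tail_cons] at IH1
      have hSD' : rStarts (a :: b :: t) = a :: rStarts (b :: t) := by
        rw [hSD]
        unfold rStarts
        congr 1
        apply List.filter_congr
        intro x hx
        have hxne : x - 1 ≠ a := by
          rcases List.mem_cons.1 hx with h1 | h1
          · omega
          · have := htgt x h1; omega
        have hiff : (x - 1) ∈ (a :: b :: t) ↔ (x - 1) ∈ (b :: t) := by
          constructor
          · intro hm
            rcases List.mem_cons.1 hm with h1 | h1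
            · exact absurd h1 hxne
            · exact h1
          · intro hm
            exact List.mem_cons_of_mem _ hm
        simp only [hiff]
      have hED' : rEnds (a :: b :: t) = a :: rEnds (b :: t) := by
        unfold rEnds
        rw [List.filter_cons]
        have ham : (a + 1) ∉ (a :: b :: t) := by
          intro hm
          rcases List.mem_cons.1 hm with h1 | h1
          · omega
          rcases List.mem_cons.1 h1 with h2 | h2
          · omega
          · have := htgt _ h2; omega
        rw [if_pos (by simp [ham])]
        congr 1
        apply List.filter_congr
        intro x hx
        have hxa : a < x := hTgt x hx
        have hiff : (x + 1) ∈ (a :: b :: t) ↔ (x + 1) ∈ (b :: t) := by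
          constructor
          · intro hm
            rcases List.mem_cons.1 hm with h1 | h1
            · omega
            · exact h1
          · intro hm
            exact List.mem_cons_of_mem _ hm
        simp only [hiff]
      have hbs : bStep (g, m) (a, b) = (g + 1, max m (b - a)) := by
        have : b - a > 1 := by omega
        simp [bStep, this]
      have hheadT : ∃ r, rStarts (b :: t) = b :: r := ⟨_, hST⟩
      obtain ⟨r, hr⟩ := hheadT
      have hzipB : (rEnds (a :: b :: t)).zip ((rStarts (a :: b :: t)).tail) =
          (a, b) :: ((rEnds (b :: t)).zip ((rStarts (b :: t)).tail)) := by
        rw [hSD', hED', List.tail_cons, hr]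
        rfl
      refine ⟨?_, ?_⟩
      · rw [hzipD, List.foldl_cons, hbs, IH1, hzipB, List.foldl_cons]
        have hm1 : mStep m (a, b) = max m (b - a) := rfl
        rw [hm1, hSD']
        simp only [Prod.mk.injEq, and_true]
        push_cast [List.length_cons]
        ring
      · intro p hp
        rw [hzipB] at hp
        rcases List.mem_cons.1 hp with h1 | h1
        · subst h1
          show (1 : Int) < b - a
          omega
        · exact IH2 p h1
  termination_by d => d.length

-- maxD with default 0 over a nonnegative list is the running-max loop from 0
lemma maxD_eq_foldl (l : List Int) (hl : ∀ x ∈ l, 0 ≤ x) :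
    PySem.List.maxD l (fun x => x) 0 = l.foldl max 0 := by
  cases l with
  | nil => rfl
  | cons x t =>
    unfold PySem.List.maxD
    rw [PySem.List.max?_id_cons]
    simp [max_eq_right (hl x (by simp))]

-- ===== VERDICT (by name: the statement is the Claim_ definition above) =====
theorem continuity_metrics_spec : Claim_equal_continuity_metrics := by
  intro cycles _
  unfold Spec_continuity_metrics continuity_metrics continuity_metrics_alt
  by_cases hlen : cycles.length < 2
  · simp [hlen]
  · simp only [hlen, if_false]
    have hL : (PySem.List.sorted cycles (fun x => x) false).length = cycles.length :=
      (PySem.List.sorted_perm ..).length_eq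
    obtain ⟨p, rest, hpr⟩ : ∃ p rest, PySem.List.sorted cycles (fun x => x) false = p :: rest := by
      cases hE : PySem.List.sorted cycles (fun x => x) false with
      | nil => rw [hE] at hL; simp at hL; omega
      | cons p rest => exact ⟨p, rest, rfl⟩
    have hchain : List.IsChain (· ≤ ·) (p :: rest) := by
      have := PySem.List.sorted_pairwise (xs := cycles) (key := fun x => x)
      rw [hpr] at this
      exact List.isChain_iff_pairwise.2 (by simpa using this)
    have hdpw : (dAdj (p :: rest)).Pairwise (· < ·) :=
      pairwise_lt_dAdj _ (List.isChain_iff_pairwise.1 hchain)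
    have hchlt : List.IsChain (· < ·) (dAdj (p :: rest)) := List.isChain_iff_pairwise.2 hdpw
    have hdne : dAdj (p :: rest) ≠ [] := by
      obtain ⟨r, hr⟩ := dAdj_cons_head rest p
      simp [hr]
    have hdnd : (dAdj (p :: rest)).Nodup := hdpw.imp ne_of_lt
    have hmemd : ∀ y : Int, y ∈ dAdj (p :: rest) ↔ y ∈ PySem.Set.ofList cycles := by
      intro y
      rw [mem_dAdj, ← hpr, PySem.List.mem_sorted, PySem.Set.mem_ofList]
    have hperm : (dAdj (p :: rest)).Perm (PySem.Set.ofList cycles) :=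
      (List.perm_ext_iff_of_nodup hdnd (PySem.Set.nodup_ofList _)).2 hmemd
    have hcont : ∀ y : Int,
        PySem.Set.contains (PySem.Set.ofList cycles) y = decide (y ∈ dAdj (p :: rest)) := by
      intro y
      simp only [PySem.Set.contains_eq_listContains]
      rw [show List.contains (PySem.Set.ofList cycles) y
          = decide (y ∈ PySem.Set.ofList cycles) from by simp]
      exact decide_eq_decide.2 (hmemd y).symm
    have hstarts : PySem.List.sorted
        ((PySem.Set.ofList cycles).filter
          (fun x => !(PySem.Set.contains (PySem.Set.ofList cycles) (x - 1)))) (fun x => x) false =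
        rStarts (dAdj (p :: rest)) := by
      apply PySem.List.sorted_eq_of_perm_of_pairwise_lt
      · have h2 : rStarts (dAdj (p :: rest)) =
            (dAdj (p :: rest)).filter
              (fun x => !(PySem.Set.contains (PySem.Set.ofList cycles) (x - 1))) := by
          unfold rStarts
          apply List.filter_congr
          intro x _
          rw [hcont]
          simp
        rw [h2]
        exact hperm.filter _
      · simpa using hdpw.sublist List.filter_sublist
    have hends : PySem.List.sorted
        ((PySem.Set.ofList cycles).filter
          (fun x => !(PySem.Set.contains (PySem.Set.ofList cycles) (x + 1)))) (fun x => x) false =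
        rEnds (dAdj (p :: rest)) := by
      apply PySem.List.sorted_eq_of_perm_of_pairwise_lt
      · have h2 : rEnds (dAdj (p :: rest)) =
            (dAdj (p :: rest)).filter
              (fun x => !(PySem.Set.contains (PySem.Set.ofList cycles) (x + 1))) := by
          unfold rEnds
          apply List.filter_congr
          intro x _
          rw [hcont]
          simp
        rw [h2]
        exact hperm.filter _
      · simpa using hdpw.sublist List.filter_sublist
    obtain ⟨hfold, hpos⟩ := runs_eq (dAdj (p :: rest)) hchlt 0 0 hdne
    have hmaxd : PySem.List.maxD
        ((((rEnds (dAdj (p :: rest))).zip ((rStarts (dAdj (p :: rest))).tail)).map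
          (fun q => q.2 - q.1))) (fun x => x) 0 =
        ((rEnds (dAdj (p :: rest))).zip ((rStarts (dAdj (p :: rest))).tail)).foldl mStep 0 := by
      rw [maxD_eq_foldl]
      · rw [List.foldl_map]
        rfl
      · intro x hx
        obtain ⟨q, hq, hqx⟩ := List.mem_map.1 hx
        have := hpos q hq
        omega
    rw [hpr]
    dsimp only
    rw [loop_eq rest p 0 0 0 hchain, hfold, PySem.List.slice_from_one, hstarts, hends, hmaxd]
    have hlenS : (PySem.Set.len (PySem.Set.ofList cycles) : Int) =
        ((dAdj (p :: rest)).length : Int) := by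
      unfold PySem.Set.len
      exact congrArg (fun n : Nat => (n : Int)) hperm.length_eq.symm
    have hlc : ((p :: rest).length : Int) = (cycles.length : Int) := by
      rw [← hL, hpr]
    rw [hlenS, hlc]
    simp only [Prod.mk.injEq]
    refine ⟨by ring, trivial, by ring⟩
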